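-- pv_equiv track=rewrite | github.com/CallMeChewy/MasterMenu | apps/finder/Tests/test_suite_generator.py | _normalize_operators
-- ===== SOURCE A (Python) =====
-- def _normalize_operators(formula):
--     """Normalize operators for evaluation"""
--     operator_map = [
--         ('&&', ' AND '),
--         ('||', ' OR '),
--         ('&', ' AND '),
--         ('|', ' OR '),
--         ('!', ' NOT '),
--         ('~', ' NOT '),
--         ('^', ' XOR ')
--     ]
--
--     normalized = formula
--     for symbol, replacement in operator_map:
--         normalized = normalized.replace(symbol, replacement)
--
--     return normalized
-- ===== SOURCE B (Python) =====
-- def _normalize_operators(formula):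
--     """Normalize operators in one left-to-right pass (two-char ops matched first)."""
--     two = {'&&': ' AND ', '||': ' OR '}
--     one = {'&': ' AND ', '|': ' OR ', '!': ' NOT ', '~': ' NOT ', '^': ' XOR '}
--     out = []
--     i = 0
--     n = len(formula)
--     while i < n:
--         pair = formula[i:i + 2]
--         if pair in two:
--             out.append(two[pair])
--             i += 2
--         else:
--             c = formula[i]
--             out.append(one.get(c, c))
--             i += 1
--     return ''.join(out)
-- ===== Notes on version B (the rewrite author's own statement) =====
-- stated objective: alternative
-- what changed: Replaced seven sequential full-string str.replace passes with a single left-to-right scan that matches the two-character operators before the single-character ones and emits the replacement words directly.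
import Mathlib
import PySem

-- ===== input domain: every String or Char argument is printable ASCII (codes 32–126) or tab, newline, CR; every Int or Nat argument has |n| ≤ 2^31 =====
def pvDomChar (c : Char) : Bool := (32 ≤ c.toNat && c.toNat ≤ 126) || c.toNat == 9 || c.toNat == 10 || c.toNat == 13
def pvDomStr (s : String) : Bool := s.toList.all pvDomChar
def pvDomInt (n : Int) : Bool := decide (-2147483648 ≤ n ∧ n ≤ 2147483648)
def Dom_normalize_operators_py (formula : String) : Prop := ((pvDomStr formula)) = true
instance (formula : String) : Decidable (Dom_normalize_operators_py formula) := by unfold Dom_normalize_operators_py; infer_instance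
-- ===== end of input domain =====

-- B replaces A's seven sequential full-string replace passes by ONE left-to-right scan
-- (two-char operators matched before single-char ones); objective: alternative single-pass algorithm.

-- ===== PORT A =====
-- literal port: fold the operator table, one str.replace per entry
def normalize_operators_py (formula : String) : String :=
  let operator_map : List (String × String) :=
    [("&&", " AND "), ("||", " OR "), ("&", " AND "), ("|", " OR "),
     ("!", " NOT "), ("~", " NOT "), ("^", " XOR ")]
  operator_map.foldl (fun normalized p => PySem.Str.replace normalized p.1 p.2) formula

-- ===== PORT B =====
-- Source B's one.get(c, c) lookup
def pvSub1 (c : Char) : List Char :=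
  if c = '&' then [' ','A','N','D',' ']
  else if c = '|' then [' ','O','R',' ']
  else if c = '!' then [' ','N','O','T',' ']
  else if c = '~' then [' ','N','O','T',' ']
  else if c = '^' then [' ','X','O','R',' ']
  else [c]

-- Source B's while-loop: look at the next two chars, match '&&'/'||' first, else one char
def pvScan : List Char → List Char
  | [] => []
  | [a] => pvSub1 a
  | a :: b :: r =>
      if a = '&' ∧ b = '&' then [' ','A','N','D',' '] ++ pvScan r
      else if a = '|' ∧ b = '|' then [' ','O','R',' '] ++ pvScan r
      else pvSub1 a ++ pvScan (b :: r)

def normalize_operators_py_alt (formula : String) : String :=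
  String.ofList (pvScan formula.toList)

-- ===== PRECONDITION & SPEC =====
def Spec_normalize_operators_py (formula : String) (out : String) : Prop := out = normalize_operators_py_alt formula
instance (formula : String) (out : String) : Decidable (Spec_normalize_operators_py formula out) := by unfold Spec_normalize_operators_py; infer_instance

-- ===== CLAIM (what is proved, stated in full; the proofs are below) =====
def Claim_equal_normalize_operators_py : Prop := ∀ (formula : String), Dom_normalize_operators_py formula → Spec_normalize_operators_py formula (normalize_operators_py formula)

-- ===== LEMMAS AND PROOFS =====

-- structural characterisation of PySem.Chars.replace for a nonempty pattern a :: os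
def pvRep (a : Char) (os nw : List Char) : List Char → List Char
  | [] => []
  | c :: t =>
      if (a :: os).isPrefixOf (c :: t) then nw ++ pvRep a os nw (t.drop os.length)
      else c :: pvRep a os nw t
termination_by l => l.length
decreasing_by
  all_goals (simp [List.length_drop]; try omega)

theorem pvGo_spec (a : Char) (os nw : List Char) :
    ∀ (fuel : Nat) (l acc : List Char), l.length ≤ fuel →
      PySem.Chars.replace.go (a :: os) nw fuel l acc = acc.reverse ++ pvRep a os nw l := by
  intro fuel
  induction fuel with
  | zero =>
      intro l acc h
      cases l with
      | nil =>
          rw [PySem.Chars.replace.go]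
          simp [pvRep]
      | cons c t => simp at h
  | succ n ih =>
      intro l acc h
      cases l with
      | nil =>
          rw [PySem.Chars.replace.go]
          simp [pvRep]
          omega
      | cons c t =>
          rw [PySem.Chars.replace.go]
          by_cases hp : (a :: os).isPrefixOf (c :: t)
          · rw [if_pos hp]
            have hlen : (List.drop (a :: os).length (c :: t)).length ≤ n := by
              simp at h ⊢; omega
            rw [ih _ _ hlen]
            simp [pvRep, hp, List.drop_succ_cons]
          · rw [if_neg hp, ih t (c :: acc) (by simp at h ⊢; omega)]
            simp [pvRep, hp]

theorem pvReplace_eq_rep (a : Char) (os nw s : List Char) :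
    PySem.Chars.replace s (a :: os) nw = pvRep a os nw s := by
  rw [PySem.Chars.replace]
  simp [pvGo_spec a os nw s.length s [] (le_refl _)]

-- a single-character replace is a flatMap
theorem pvRep_one (c : Char) (w : List Char) (l : List Char) :
    pvRep c [] w l = l.flatMap (fun x => if x = c then w else [x]) := by
  induction l with
  | nil => simp [pvRep]
  | cons x t ih =>
      by_cases hx : x = c
      · subst hx; simp [pvRep, List.isPrefixOf, ih]
      · simp [pvRep, List.isPrefixOf, hx, Ne.symm hx, ih]

-- the combined effect of the five single-character replaces is one flatMap of pvSub1
set_option maxRecDepth 8192 in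
theorem pvChain5 (l : List Char) :
    pvRep '^' [] [' ','X','O','R',' ']
      (pvRep '~' [] [' ','N','O','T',' ']
        (pvRep '!' [] [' ','N','O','T',' ']
          (pvRep '|' [] [' ','O','R',' ']
            (pvRep '&' [] [' ','A','N','D',' '] l)))) = l.flatMap pvSub1 := by
  induction l with
  | nil => simp [pvRep]
  | cons x t ih =>
      simp only [pvRep_one] at ih ⊢
      simp only [List.flatMap_cons, List.flatMap_append]
      rw [ih]
      congr 1
      by_cases h1 : x = '&'
      · subst h1; decide
      by_cases h2 : x = '|'
      · subst h2; decide
      by_cases h3 : x = '!'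
      · subst h3; decide
      by_cases h4 : x = '~'
      · subst h4; decide
      by_cases h5 : x = '^'
      · subst h5; decide
      simp [pvSub1, h1, h2, h3, h4, h5]

-- evaluation rules for a doubled-character pattern c,c
theorem pvRep2_single (c : Char) (w : List Char) (x : Char) :
    pvRep c [c] w [x] = [x] := by
  simp [pvRep, List.isPrefixOf]

theorem pvRep2_cons_eq (c : Char) (w r : List Char) :
    pvRep c [c] w (c :: c :: r) = w ++ pvRep c [c] w r := by
  simp [pvRep, List.isPrefixOf]

theorem pvRep2_cons_ne (c x : Char) (w t : List Char) (hx : x ≠ c) :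
    pvRep c [c] w (x :: t) = x :: pvRep c [c] w t := by
  cases t <;> simp [pvRep, List.isPrefixOf, Ne.symm hx]

theorem pvRep2_cons_cons_ne2 (c x : Char) (w r : List Char) (hx : x ≠ c) :
    pvRep c [c] w (c :: x :: r) = c :: pvRep c [c] w (x :: r) := by
  simp [pvRep, List.isPrefixOf, Ne.symm hx]

-- one step of a doubled-character replace whenever the pattern cannot match at the head
theorem pvRep2_cons_safe (c : Char) (w : List Char) (x : Char) (m : List Char)
    (h : ¬(x = c ∧ m.head? = some c)) :
    pvRep c [c] w (x :: m) = x :: pvRep c [c] w m := by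
  cases m with
  | nil =>
      rw [pvRep2_single]
      simp [pvRep]
  | cons y ys =>
      by_cases hx : x = c
      · subst hx
        have hy : y ≠ x := fun hy => h ⟨rfl, by simp [hy]⟩
        exact pvRep2_cons_cons_ne2 x y w ys hy
      · exact pvRep2_cons_ne c x w _ hx

-- the first character a doubled-character replace emits on x :: t is x or the head of w
theorem pvRep2_head (c : Char) (w : List Char) (x : Char) (t : List Char) (hw : w ≠ []) :
    (pvRep c [c] w (x :: t)).head? = some x ∨ (pvRep c [c] w (x :: t)).head? = w.head? := by
  cases t with
  | nil => left; rw [pvRep2_single]; rfl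
  | cons y ys =>
      by_cases hxy : x = c ∧ y = c
      · right
        obtain ⟨hx, hy⟩ := hxy
        rw [hx, hy, pvRep2_cons_eq]
        cases w with
        | nil => exact absurd rfl hw
        | cons a as => rfl
      · left
        rcases (by tauto : x ≠ c ∨ (x = c ∧ y ≠ c)) with hx | ⟨hx, hy⟩
        · rw [pvRep2_cons_ne c x w _ hx]; rfl
        · rw [hx, pvRep2_cons_cons_ne2 c y w ys hy]; rfl

-- a doubled-character replace passes over a block not containing that character
theorem pvRep2_append (c : Char) (w p q : List Char) (hp : c ∉ p) :
    pvRep c [c] w (p ++ q) = p ++ pvRep c [c] w q := by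
  induction p with
  | nil => simp
  | cons x p' ih =>
      have hx : x ≠ c := by simp at hp; tauto
      have hp' : c ∉ p' := by simp at hp; tauto
      rw [List.cons_append, pvRep2_cons_ne c x w _ hx, ih hp', List.cons_append]

-- pvSub1 fixes every character of the two replacement words
theorem pvSub1_fix_and : ∀ x ∈ [' ','A','N','D',' '], pvSub1 x = [x] := by
  intro x hx
  simp only [List.mem_cons] at hx
  rcases hx with h|h|h|h|h|h <;> first | (subst h; rfl) | simp at h

theorem pvSub1_fix_or : ∀ x ∈ [' ','O','R',' '], pvSub1 x = [x] := by
  intro x hx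
  simp only [List.mem_cons] at hx
  rcases hx with h|h|h|h|h <;> first | (subst h; rfl) | simp at h

-- flatMap pvSub1 is the identity on a block of non-operator characters
theorem pvFlat_id (p : List Char) (hp : ∀ x ∈ p, pvSub1 x = [x]) :
    p.flatMap pvSub1 = p := by
  induction p with
  | nil => simp
  | cons x t ih =>
      simp [hp x (by simp), ih (fun y hy => hp y (by simp [hy]))]

-- core: the three-stage pipeline (&&-replace, ||-replace, five single flatMaps) is the single scan
theorem pvMain (l : List Char) :
    (pvRep '|' ['|'] [' ','O','R',' '] (pvRep '&' ['&'] [' ','A','N','D',' '] l)).flatMap pvSub1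
      = pvScan l := by
  induction l using pvScan.induct with
  | case1 => simp [pvRep, pvScan]
  | case2 a =>
      rw [pvRep2_single, pvRep2_single]
      simp [pvScan]
  | case3 a b r hab ih =>
      obtain ⟨ha, hb⟩ := hab
      subst ha; subst hb
      rw [pvRep2_cons_eq,
          pvRep2_append '|' [' ','O','R',' '] [' ','A','N','D',' '] _ (by decide),
          List.flatMap_append, pvFlat_id [' ','A','N','D',' '] pvSub1_fix_and, ih]
      simp [pvScan]
  | case4 a b r hab hbb ih =>
      obtain ⟨ha, hb⟩ := hbb
      subst ha; subst hb
      rw [pvRep2_cons_ne '&' '|' _ _ (by decide), pvRep2_cons_ne '&' '|' _ _ (by decide),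
          pvRep2_cons_eq, List.flatMap_append, pvFlat_id [' ','O','R',' '] pvSub1_fix_or, ih]
      simp [pvScan]
  | case5 a b r hab hbb ih =>
      have hand : ¬(a = '&' ∧ b = '&') := hab
      have hor : ¬(a = '|' ∧ b = '|') := hbb
      have e1 : pvRep '&' ['&'] [' ','A','N','D',' '] (a :: b :: r)
          = a :: pvRep '&' ['&'] [' ','A','N','D',' '] (b :: r) := by
        apply pvRep2_cons_safe
        rintro ⟨ha, hh⟩
        simp at hh
        exact hand ⟨ha, hh⟩
      have e2 : pvRep '|' ['|'] [' ','O','R',' '] (a :: pvRep '&' ['&'] [' ','A','N','D',' '] (b :: r))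
          = a :: pvRep '|' ['|'] [' ','O','R',' '] (pvRep '&' ['&'] [' ','A','N','D',' '] (b :: r)) := by
        apply pvRep2_cons_safe
        rintro ⟨ha, hh⟩
        subst ha
        rcases pvRep2_head '&' ([' ','A','N','D',' ']) b r (by decide) with h | h
        · rw [h] at hh
          exact hor ⟨rfl, by simpa using hh⟩
        · rw [h] at hh
          simp at hh
      rw [e1, e2, List.flatMap_cons, ih]
      conv_rhs => rw [pvScan]
      rw [if_neg hand, if_neg hor]

-- assemble: unfold A's fold into the seven replaces and rewrite stage by stage
theorem pvToList_A (s : String) :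
    (normalize_operators_py s).toList = pvScan s.toList := by
  show (PySem.Str.replace (PySem.Str.replace (PySem.Str.replace (PySem.Str.replace
        (PySem.Str.replace (PySem.Str.replace (PySem.Str.replace s "&&" " AND ")
        "||" " OR ") "&" " AND ") "|" " OR ") "!" " NOT ") "~" " NOT ") "^" " XOR ").toList
      = pvScan s.toList
  simp only [PySem.Str.toList_replace]
  have h2 : ("&&" : String).toList = '&' :: ['&'] := rfl
  have h3 : ("||" : String).toList = '|' :: ['|'] := rfl
  have o1 : ("&" : String).toList = '&' :: ([] : List Char) := rfl
  have o2 : ("|" : String).toList = '|' :: ([] : List Char) := rfl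
  have o3 : ("!" : String).toList = '!' :: ([] : List Char) := rfl
  have o4 : ("~" : String).toList = '~' :: ([] : List Char) := rfl
  have o5 : ("^" : String).toList = '^' :: ([] : List Char) := rfl
  have w1 : (" AND " : String).toList = [' ','A','N','D',' '] := rfl
  have w2 : (" OR " : String).toList = [' ','O','R',' '] := rfl
  have w3 : (" NOT " : String).toList = [' ','N','O','T',' '] := rfl
  have w4 : (" XOR " : String).toList = [' ','X','O','R',' '] := rfl
  rw [h2, h3, o1, o2, o3, o4, o5, w1, w2, w3, w4]
  simp only [pvReplace_eq_rep]
  rw [pvChain5, pvMain]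

-- ===== VERDICT (by name: the statement is the Claim_ definition above) =====
theorem normalize_operators_py_spec : Claim_equal_normalize_operators_py := by
  intro formula _
  unfold Spec_normalize_operators_py normalize_operators_py_alt
  apply String.toList_inj.mp
  simp [pvToList_A]
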